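-- pv_equiv track=rewrite | github.com/mc-lan/Text4Seg | playground/data/create_json/create_mapillary.py | encode_mask
-- ===== SOURCE A (Python) =====
-- def encode_mask(mask_list):
--     rows = []
--     for row in mask_list:
--         encoded_row = []
--         count = 1
--         for j in range(1, len(row)):
--             if row[j] == row[j-1]:
--                 count += 1
--             else:
--                 encoded_row.append(f"{row[j-1]} *{count}")
--                 count = 1
--         encoded_row.append(f"{row[-1]} *{count}")
--         rows.append(", ".join(encoded_row))
--     return "; ".join(rows) + ";"
-- ===== SOURCE B (Python) =====
-- def encode_mask(mask_list):
--     rows = []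
--     for row in mask_list:
--         parts = []
--         rest = row
--         while rest:
--             v = rest[0]
--             run = 1
--             rest = rest[1:]
--             while rest and rest[0] == v:
--                 run += 1
--                 rest = rest[1:]
--             parts.append(f"{v} *{run}")
--         rows.append(", ".join(parts))
--     return "; ".join(rows) + ";"
-- ===== Notes on version B (the rewrite author's own statement) =====
-- stated objective: alternative
-- what changed: B consumes each row as a sequence of runs (outer loop takes the head value, an inner loop strips the whole equal-valued run off the front) instead of A's index loop over range(1,len) comparing row[j] with row[j-1] with a count accumulator and a separate final append; B needs no indexing and no last-element special case, at the cost of slice copies.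
-- outside the precondition, e.g. on encode_mask([[]]): A raises IndexError, B returns ';'
-- crash fix: On inputs containing an empty row A raises IndexError at row[-1]; B's run loop simply emits nothing for that row, so the row contributes an empty string to the '; '-join. — e.g. on encode_mask([[]]): A raises IndexError, B returns ";"
import Mathlib
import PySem

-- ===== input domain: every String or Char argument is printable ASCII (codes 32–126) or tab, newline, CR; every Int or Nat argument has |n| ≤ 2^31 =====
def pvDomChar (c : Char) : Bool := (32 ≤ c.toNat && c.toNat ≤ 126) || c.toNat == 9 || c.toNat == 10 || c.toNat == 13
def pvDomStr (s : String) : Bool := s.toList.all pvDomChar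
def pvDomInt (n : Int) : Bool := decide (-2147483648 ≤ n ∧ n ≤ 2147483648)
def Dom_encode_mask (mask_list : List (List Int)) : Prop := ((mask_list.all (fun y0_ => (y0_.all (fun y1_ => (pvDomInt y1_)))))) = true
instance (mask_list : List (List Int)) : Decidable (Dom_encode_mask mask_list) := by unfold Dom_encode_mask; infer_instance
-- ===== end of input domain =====

-- B consumes each row run by run from the front instead of A's index loop with a count
-- accumulator and a separate final append; same cost, no indexing and no last-element special case.

-- ===== PORT A =====
-- literal port of A: index loop 'for j in range(1, len(row))' with (encoded_row, count) state,
-- then the final 'row[-1]' append (pyGetD; Pre_ keeps rows nonempty so row[-1] is in range)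
def encode_mask (mask_list : List (List Int)) : String :=
  let rows := mask_list.foldl (fun (rows : List String) (row : List Int) =>
    let st := (PySem.List.pyRange 1 (PySem.List.len row) 1).foldl
      (fun (p : List String × Int) (j : Int) =>
        if PySem.List.pyGetD row j 0 = PySem.List.pyGetD row (j - 1) 0 then
          (p.1, p.2 + 1)
        else
          (p.1 ++ [PySem.Int.toStr (PySem.List.pyGetD row (j - 1) 0) ++ " *" ++ PySem.Int.toStr p.2], 1))
      ([], 1)
    let encoded_row := st.1 ++ [PySem.Int.toStr (PySem.List.pyGetD row (-1) 0) ++ " *" ++ PySem.Int.toStr st.2]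
    rows ++ [PySem.Str.join ", " encoded_row]) []
  PySem.Str.join "; " rows ++ ";"

-- ===== PORT B =====
-- inner 'while rest and rest[0] == v' loop of Source B: strips the run of v off the front
def pvRunStrip (v run : Int) : List Int → Int × List Int
  | [] => (run, [])
  | x :: xs => if x = v then pvRunStrip v (run + 1) xs else (run, x :: xs)

theorem pvRunStrip_rest_le (v run : Int) : ∀ xs : List Int, ((pvRunStrip v run xs).2).length ≤ xs.length := by
  intro xs
  induction xs generalizing run with
  | nil => simp [pvRunStrip]
  | cons x xs ih =>
    by_cases h : x = v
    · simpa [pvRunStrip, h] using Nat.le_succ_of_le (ih (run + 1))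
    · simp [pvRunStrip, h]

-- outer 'while rest' loop of Source B
def pvEncodeRow : List Int → List String
  | [] => []
  | v :: rest0 =>
    let pr := pvRunStrip v 1 rest0
    (PySem.Int.toStr v ++ " *" ++ PySem.Int.toStr pr.1) :: pvEncodeRow pr.2
termination_by l => l.length
decreasing_by
  exact Nat.lt_succ_of_le (pvRunStrip_rest_le _ _ _)

def encode_mask_alt (mask_list : List (List Int)) : String :=
  PySem.Str.join "; "
    (mask_list.foldl (fun (rows : List String) row =>
      rows ++ [PySem.Str.join ", " (pvEncodeRow row)]) []) ++ ";"

-- ===== PRECONDITION & SPEC =====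
-- Pre_ excludes inputs with an empty row: there A raises IndexError at row[-1] (returns nothing).
def Pre_encode_mask (mask_list : List (List Int)) : Prop := ∀ row ∈ mask_list, row ≠ []
instance (mask_list : List (List Int)) : Decidable (Pre_encode_mask mask_list) := by unfold Pre_encode_mask; infer_instance
def pvWitness_encode_mask : List (List Int) := [[1, 1, 2], [3]]

-- On inputs containing an empty row A raises IndexError at row[-1]; B emits no runs for that row,
-- so it contributes an empty string to the '; '-join.
def Raises_encode_mask (mask_list : List (List Int)) : Prop := ∃ row ∈ mask_list, row = []
instance (mask_list : List (List Int)) : Decidable (Raises_encode_mask mask_list) := by unfold Raises_encode_mask; infer_instance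
def pvRaiseWitness_encode_mask : List (List Int) := [[]]
def pvRaiseWitnessOut_encode_mask : String := ";"

def Spec_encode_mask (mask_list : List (List Int)) (out : String) : Prop := out = encode_mask_alt mask_list
instance (mask_list : List (List Int)) (out : String) : Decidable (Spec_encode_mask mask_list out) := by unfold Spec_encode_mask; infer_instance

-- ===== CLAIM (what is proved, stated in full; the proofs are below) =====
def Claim_equal_encode_mask : Prop := ∀ (mask_list : List (List Int)), Dom_encode_mask mask_list → Pre_encode_mask mask_list → Spec_encode_mask mask_list (encode_mask mask_list)
def Claim_raises_encode_mask : Prop := (∀ (mask_list : List (List Int)), Dom_encode_mask mask_list → Raises_encode_mask mask_list → ¬ Pre_encode_mask mask_list) ∧ (Dom_encode_mask (pvRaiseWitness_encode_mask) ∧ Raises_encode_mask (pvRaiseWitness_encode_mask) ∧ encode_mask_alt (pvRaiseWitness_encode_mask) = pvRaiseWitnessOut_encode_mask)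

-- ===== LEMMAS AND PROOFS =====

-- A's loop body as a function of the (prev, cur) pair of adjacent values
def pvStepA (p : List String × Int) (q : Int × Int) : List String × Int :=
  if q.2 = q.1 then (p.1, p.2 + 1)
  else (p.1 ++ [PySem.Int.toStr q.1 ++ " *" ++ PySem.Int.toStr p.2], 1)

-- A's remaining computation once the pending (value, count) is (v, c) and rest is still to scan
def pvCont (v c : Int) : List Int → List String
  | [] => [PySem.Int.toStr v ++ " *" ++ PySem.Int.toStr c]
  | x :: xs =>
    if x = v then pvCont v (c + 1) xs
    else (PySem.Int.toStr v ++ " *" ++ PySem.Int.toStr c) :: pvCont x 1 xs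

theorem pvFoldNat_eq_zip (xs : List Int) : ∀ (v : Int) (init : List String × Int),
    (List.range xs.length).foldl
      (fun p k => pvStepA p ((v :: xs).getD k 0, xs.getD k 0)) init
    = ((v :: xs).zip xs).foldl pvStepA init := by
  induction xs with
  | nil => intro v init; simp
  | cons x ys ih =>
    intro v init
    rw [List.length_cons, List.range_succ_eq_map, List.foldl_cons, List.foldl_map]
    simpa using ih x (pvStepA init (v, x))

theorem pvFoldA_eq_zip (v : Int) (xs : List Int) (init : List String × Int) :
    (PySem.List.pyRange 1 (PySem.List.len (v :: xs)) 1).foldl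
      (fun (p : List String × Int) (j : Int) =>
        if PySem.List.pyGetD (v :: xs) j 0 = PySem.List.pyGetD (v :: xs) (j - 1) 0 then
          (p.1, p.2 + 1)
        else
          (p.1 ++ [PySem.Int.toStr (PySem.List.pyGetD (v :: xs) (j - 1) 0) ++ " *" ++ PySem.Int.toStr p.2], 1))
      init
    = ((v :: xs).zip xs).foldl pvStepA init := by
  have hlen : PySem.List.len (v :: xs) = ((xs.length + 1 : Nat) : Int) := by
    simp [PySem.List.len_eq]
  rw [hlen, PySem.List.pyRange_one, List.foldl_map]
  have hcast : ((((xs.length + 1 : Nat) : Int)) - 1).toNat = xs.length := by omega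
  rw [hcast]
  rw [show (fun (p : List String × Int) (k : Nat) =>
        if PySem.List.pyGetD (v :: xs) (1 + (k : Int)) 0 = PySem.List.pyGetD (v :: xs) ((1 + (k : Int)) - 1) 0 then
          (p.1, p.2 + 1)
        else
          (p.1 ++ [PySem.Int.toStr (PySem.List.pyGetD (v :: xs) ((1 + (k : Int)) - 1) 0) ++ " *" ++ PySem.Int.toStr p.2], 1))
      = (fun p k => pvStepA p ((v :: xs).getD k 0, xs.getD k 0)) from ?_]
  · exact pvFoldNat_eq_zip xs v init
  · funext p k
    have h1 : (1 + (k : Int)) = (((k + 1 : Nat)) : Int) := by push_cast; ring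
    rw [h1]
    have h2 : (((k + 1 : Nat) : Int)) - 1 = ((k : Nat) : Int) := by push_cast; ring
    rw [h2, PySem.List.pyGetD_natCast, PySem.List.pyGetD_natCast]
    simp [pvStepA]

theorem pvZip_cont (xs : List Int) : ∀ (v : Int) (acc : List String) (c : Int),
    ((((v :: xs).zip xs).foldl pvStepA (acc, c)).1
      ++ [PySem.Int.toStr (xs.getLastD v) ++ " *" ++ PySem.Int.toStr ((((v :: xs).zip xs).foldl pvStepA (acc, c)).2)])
    = acc ++ pvCont v c xs := by
  induction xs with
  | nil => intro v acc c; simp [pvCont]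
  | cons x ys ih =>
    intro v acc c
    rw [List.getLastD_cons, List.zip_cons_cons, List.foldl_cons]
    by_cases h : x = v
    · subst h
      rw [show pvStepA (acc, c) (x, x) = (acc, c + 1) from by simp [pvStepA]]
      rw [show pvCont x c (x :: ys) = pvCont x (c + 1) ys from by simp [pvCont]]
      exact ih x acc (c + 1)
    · rw [show pvStepA (acc, c) (v, x)
            = (acc ++ [PySem.Int.toStr v ++ " *" ++ PySem.Int.toStr c], 1) from by simp [pvStepA, h]]
      rw [show pvCont v c (x :: ys)
            = (PySem.Int.toStr v ++ " *" ++ PySem.Int.toStr c) :: pvCont x 1 ys from by simp [pvCont, h]]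
      rw [ih x (acc ++ [PySem.Int.toStr v ++ " *" ++ PySem.Int.toStr c]) 1]
      simp

theorem pvCont_eq_encodeRow (xs : List Int) : ∀ (v c : Int),
    pvCont v c xs
    = (PySem.Int.toStr v ++ " *" ++ PySem.Int.toStr (pvRunStrip v c xs).1) :: pvEncodeRow (pvRunStrip v c xs).2 := by
  induction xs with
  | nil => intro v c; simp [pvCont, pvRunStrip, pvEncodeRow]
  | cons x ys ih =>
    intro v c
    by_cases h : x = v
    · simp only [pvCont, pvRunStrip, h, if_pos]
      exact ih v (c + 1)
    · simp only [pvCont, pvRunStrip, if_neg h]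
      rw [ih x 1, pvEncodeRow]

theorem pvRow_eq (row : List Int) (hrow : row ≠ []) :
    ((PySem.List.pyRange 1 (PySem.List.len row) 1).foldl
      (fun (p : List String × Int) (j : Int) =>
        if PySem.List.pyGetD row j 0 = PySem.List.pyGetD row (j - 1) 0 then
          (p.1, p.2 + 1)
        else
          (p.1 ++ [PySem.Int.toStr (PySem.List.pyGetD row (j - 1) 0) ++ " *" ++ PySem.Int.toStr p.2], 1))
      ([], 1)).1
    ++ [PySem.Int.toStr (PySem.List.pyGetD row (-1) 0) ++ " *" ++ PySem.Int.toStr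
        (((PySem.List.pyRange 1 (PySem.List.len row) 1).foldl
          (fun (p : List String × Int) (j : Int) =>
            if PySem.List.pyGetD row j 0 = PySem.List.pyGetD row (j - 1) 0 then
              (p.1, p.2 + 1)
            else
              (p.1 ++ [PySem.Int.toStr (PySem.List.pyGetD row (j - 1) 0) ++ " *" ++ PySem.Int.toStr p.2], 1))
          ([], 1)).2)]
    = pvEncodeRow row := by
  match row with
  | v :: xs =>
    have hlast : PySem.List.pyGetD (v :: xs) (-1) (0 : Int) = xs.getLastD v := by
      rw [PySem.List.pyGetD_neg_one (v :: xs) 0 (List.cons_ne_nil v xs)]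
      exact List.getLast_eq_getLastD _
    rw [pvFoldA_eq_zip v xs ([], 1), hlast, pvZip_cont xs v [] 1, List.nil_append,
      pvCont_eq_encodeRow xs v 1, pvEncodeRow]

-- ===== VERDICT (by name: the statement is the Claim_ definition above) =====
theorem encode_mask_spec : Claim_equal_encode_mask := by
  intro mask_list _ hpre
  unfold Spec_encode_mask encode_mask encode_mask_alt
  rw [PySem.List.foldl_append_singleton_eq_map, PySem.List.foldl_append_singleton_eq_map]
  rw [List.map_congr_left
    (fun row hmem => congrArg (PySem.Str.join ", ") (pvRow_eq row (hpre row hmem)))]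

theorem encode_mask_raises : Claim_raises_encode_mask := by
  unfold Claim_raises_encode_mask
  constructor
  · intro ml _ hr hpre
    obtain ⟨row, hmem, hnil⟩ := hr
    exact hpre row hmem hnil
  · exact ⟨by decide, ⟨[], by simp [pvRaiseWitness_encode_mask]⟩, by
      show PySem.Str.join "; " ([] ++ [PySem.Str.join ", " (pvEncodeRow [])]) ++ ";" = ";"
      rw [show pvEncodeRow ([] : List Int) = [] from by rw [pvEncodeRow]]
      rfl⟩

theorem pvRaiseWitness_ok : Raises_encode_mask pvRaiseWitness_encode_mask ∧ ¬ Pre_encode_mask pvRaiseWitness_encode_mask :=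
  ⟨encode_mask_raises.2.2.1, encode_mask_raises.1 pvRaiseWitness_encode_mask (by decide) encode_mask_raises.2.2.1⟩
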